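-- pv_equiv track=rewrite | github.com/python-thread/thread | src/thread/utils/algorithm.py | chunk_split
-- ===== SOURCE A (Python) =====
-- from typing import Tuple, Generator
--
-- def chunk_split(
--     dataset_length: int, number_of_chunks: int
-- ) -> Generator[Tuple[int, int], None, None]:
--     """
--     Splits a dataset into balanced chunks
--
--     If the size of the dataset is not fully divisible by the number of chunks, it is split like this
--       > `[ [n+1], [n+1], [n+1], [n], [n], [n] ]`
--
--
--     Parameters
--     ----------
--     :param dataset_length: This should be the length of the dataset you want to split into chunks
--     :param number_of_chunks: The should be the number of chunks it will attempt to split into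
--
--
--     Returns
--     -------
--     :returns Generator[tuple[int, int], None, None]: The chunked dataset slices
--
--     Raises
--     ------
--     AssertionError: The number of chunks specified is larger than the dataset size
--     """
--     assert (
--         dataset_length >= number_of_chunks
--     ), 'The number of chunks specified is larger than the dataset size'
--
--     chunk_count = dataset_length // number_of_chunks
--     overflow = dataset_length % number_of_chunks
--
--     i = 0
--     while i < dataset_length:
--         chunk_length = chunk_count + int(overflow > 0)
--         b = i + chunk_length
--
--         yield (i, b)
--         overflow -= 1
--         i = b
-- ===== SOURCE B (Python) =====
-- def chunk_split(dataset_length, number_of_chunks):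
--     assert (
--         dataset_length >= number_of_chunks
--     ), 'The number of chunks specified is larger than the dataset size'
--
--     chunk_count = dataset_length // number_of_chunks
--     overflow = dataset_length % number_of_chunks
--
--     for k in range(number_of_chunks):
--         yield (k * chunk_count + min(k, overflow),
--                (k + 1) * chunk_count + min(k + 1, overflow))
-- ===== Notes on version B (the rewrite author's own statement) =====
-- stated objective: simpler
-- what changed: Replaces the while-loop that threads a running start index and a decrementing overflow counter with a single map over range(number_of_chunks) computing each slice's (start, end) independently by the closed form k*chunk_count + min(k, overflow).
import Mathlib
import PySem

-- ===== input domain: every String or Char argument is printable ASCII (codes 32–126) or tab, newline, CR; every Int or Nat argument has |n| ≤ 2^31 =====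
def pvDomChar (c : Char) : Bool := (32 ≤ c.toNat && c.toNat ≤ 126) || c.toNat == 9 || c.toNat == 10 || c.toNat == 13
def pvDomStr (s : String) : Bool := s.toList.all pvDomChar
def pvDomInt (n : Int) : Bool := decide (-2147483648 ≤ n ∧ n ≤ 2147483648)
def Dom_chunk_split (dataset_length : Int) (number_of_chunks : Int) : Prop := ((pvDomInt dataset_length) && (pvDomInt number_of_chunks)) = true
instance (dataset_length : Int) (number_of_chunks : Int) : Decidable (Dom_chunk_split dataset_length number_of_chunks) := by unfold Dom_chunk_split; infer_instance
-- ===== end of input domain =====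

-- B replaces A's while-loop with a running index and decrementing overflow counter by a
-- closed-form per-chunk formula mapped over range(number_of_chunks) (objective: simpler).

-- ===== PORT A =====
-- The while-loop of A, transliterated as fuel recursion; fuel = dataset_length.toNat
-- suffices on Pre_ (each iteration advances i by at least 1 there); the fuel guard only
-- makes the recursion total, it does not change the computation on admitted inputs.
def chunkLoopA (dataset_length chunk_count : Int) (overflow i : Int) : Nat → List (Int × Int)
  | 0 => []
  | fuel + 1 =>
    if i < dataset_length then
      let chunk_length := chunk_count + (if overflow > 0 then (1 : Int) else 0)
      let b := i + chunk_length
      (i, b) :: chunkLoopA dataset_length chunk_count (overflow - 1) b fuel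
    else []

def chunk_split (dataset_length : Int) (number_of_chunks : Int) : List (Int × Int) :=
  -- the assert and number_of_chunks = 0 (ZeroDivisionError) are excluded by Pre_
  if dataset_length ≥ number_of_chunks then
    chunkLoopA dataset_length (PySem.Int.floordiv dataset_length number_of_chunks)
      (PySem.Int.mod dataset_length number_of_chunks) 0 dataset_length.toNat
  else []

-- ===== PORT B =====
def chunk_split_alt (dataset_length : Int) (number_of_chunks : Int) : List (Int × Int) :=
  if dataset_length ≥ number_of_chunks then
    let chunk_count := PySem.Int.floordiv dataset_length number_of_chunks
    let overflow := PySem.Int.mod dataset_length number_of_chunks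
    (PySem.List.pyRange 0 number_of_chunks 1).map (fun k =>
      (k * chunk_count + min k overflow, (k + 1) * chunk_count + min (k + 1) overflow))
  else []

-- ===== PRECONDITION & SPEC =====
-- Pre_ excludes: number_of_chunks = 0 (A raises ZeroDivisionError), dataset_length <
-- number_of_chunks (A raises AssertionError), and number_of_chunks < 0 with
-- dataset_length > 0 (A's while-loop never terminates, the generator diverges).
def Pre_chunk_split (dataset_length : Int) (number_of_chunks : Int) : Prop :=
  number_of_chunks ≠ 0 ∧ dataset_length ≥ number_of_chunks ∧
    (number_of_chunks > 0 ∨ dataset_length ≤ 0)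
instance (dataset_length : Int) (number_of_chunks : Int) : Decidable (Pre_chunk_split dataset_length number_of_chunks) := by unfold Pre_chunk_split; infer_instance
def pvWitness_chunk_split : Int × Int := (7, 3)
def Spec_chunk_split (dataset_length : Int) (number_of_chunks : Int) (out : List (Int × Int)) : Prop := out = chunk_split_alt dataset_length number_of_chunks
instance (dataset_length : Int) (number_of_chunks : Int) (out : List (Int × Int)) : Decidable (Spec_chunk_split dataset_length number_of_chunks out) := by unfold Spec_chunk_split; infer_instance

-- ===== CLAIM (what is proved, stated in full; the proofs are below) =====
def Claim_equal_chunk_split : Prop := ∀ (dataset_length : Int) (number_of_chunks : Int), Dom_chunk_split dataset_length number_of_chunks → Pre_chunk_split dataset_length number_of_chunks → Spec_chunk_split dataset_length number_of_chunks (chunk_split dataset_length number_of_chunks)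

-- ===== LEMMAS AND PROOFS =====

-- position of chunk boundary k in the balanced split
def pvPos (cc ov k : Int) : Int := k * cc + min k ov

lemma pvPos_lt {cc ov c k : Int} (hcc : 1 ≤ cc) (hovc : ov < c)
    (hkc : k < c) : pvPos cc ov k < c * cc + ov := by
  unfold pvPos
  rcases le_or_gt ov k with h | h
  · have : min k ov = ov := min_eq_right h
    rw [this]; nlinarith
  · have : min k ov = k := min_eq_left (le_of_lt h)
    rw [this]; nlinarith

lemma chunkLoopA_eq (dl cc ov c : Int) (hcc : 1 ≤ cc) (_hov0 : 0 ≤ ov) (hovc : ov < c)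
    (hdl : dl = c * cc + ov) :
    ∀ (fuel : Nat) (k : Int), 0 ≤ k → k ≤ c → (c - k).toNat ≤ fuel →
      chunkLoopA dl cc (ov - k) (pvPos cc ov k) fuel =
        (PySem.List.pyRange k c 1).map (fun j =>
          (j * cc + min j ov, (j + 1) * cc + min (j + 1) ov)) := by
  intro fuel
  induction fuel with
  | zero =>
    intro k hk0 hkc hf
    have hkc' : c ≤ k := by omega
    rw [PySem.List.pyRange_one_eq_nil hkc']
    rfl
  | succ n ih =>
    intro k hk0 hkc hf
    rcases lt_or_ge k c with hlt | hge
    · have hi : pvPos cc ov k < dl := by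
        rw [hdl]; exact pvPos_lt hcc hovc hlt
      rw [PySem.List.pyRange_one_cons hlt]
      show (if pvPos cc ov k < dl then _ else _) = _
      rw [if_pos hi]
      have hstep : pvPos cc ov k + (cc + (if ov - k > 0 then (1:Int) else 0)) = pvPos cc ov (k + 1) := by
        unfold pvPos
        rcases lt_or_ge k ov with h | h
        · rw [if_pos (by omega), min_eq_left (le_of_lt h), min_eq_left (by omega)]; ring
        · rw [if_neg (by omega), min_eq_right h, min_eq_right (by omega)]; ring
      simp only [List.map_cons, List.cons.injEq]
      refine ⟨?_, ?_⟩
      · rw [hstep]; rfl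
      have h1 : ov - k - 1 = ov - (k + 1) := by ring
      rw [hstep, h1]
      exact ih (k + 1) (by omega) (by omega) (by omega)
    · have hi : ¬ pvPos cc ov k < dl := by
        have : k = c := le_antisymm hkc hge
        subst this
        rw [hdl]
        unfold pvPos
        rw [min_eq_right (le_of_lt hovc)]
        omega
      rw [PySem.List.pyRange_one_eq_nil hge]
      show (if pvPos cc ov k < dl then _ else _) = _
      rw [if_neg hi]
      simp

-- ===== VERDICT (by name: the statement is the Claim_ definition above) =====
theorem chunk_split_spec : Claim_equal_chunk_split := by
  intro dl c _hdom ⟨hc0, hge, hpos⟩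
  unfold Spec_chunk_split chunk_split chunk_split_alt
  rw [if_pos hge, if_pos hge]
  rcases lt_or_gt_of_ne hc0 with hneg | hposc
  · -- c < 0, so dl ≤ 0: loop body never runs (fuel = dl.toNat = 0 or i < dl false), range empty
    have hdl0 : dl ≤ 0 := by omega
    have hfuel : dl.toNat = 0 := by omega
    rw [hfuel, PySem.List.pyRange_one_eq_nil (by omega)]
    rfl
  · -- c > 0: the main induction
    generalize hcc : PySem.Int.floordiv dl c = cc at *
    generalize hov : PySem.Int.mod dl c = ov at *
    have hdm : cc * c + ov = dl := by rw [← hcc, ← hov]; exact PySem.Int.floordiv_mul_add_mod dl c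
    have hov0 : 0 ≤ ov := by rw [← hov]; exact PySem.Int.mod_nonneg dl hposc
    have hovc : ov < c := by rw [← hov]; exact PySem.Int.mod_lt dl hposc
    have hcc1 : 1 ≤ cc := by
      have h := (PySem.Int.le_floordiv_iff_mul_le (a := dl) (q := 1) hposc).mpr (by omega)
      omega
    have h0 : pvPos cc ov 0 = 0 := by unfold pvPos; rw [min_eq_left hov0]; ring
    have hdl : dl = c * cc + ov := by rw [mul_comm] at hdm; omega
    have hfuel : (c - 0).toNat ≤ dl.toNat := by omega
    have := chunkLoopA_eq dl cc ov c hcc1 hov0 hovc hdl dl.toNat 0 le_rfl (by omega) hfuel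
    rw [sub_zero, h0] at this
    rw [this]
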